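-- pv_equiv track=rewrite | github.com/twoload/algorithm | DivideAndConquer/DC_p1_1074_z.py | go
-- ===== SOURCE A (Python) =====
-- def power2(k):
--     return 2**k
--
-- def go(n,x,y):
--     if n==1: # 2x2
--         return 2*x+y
--     else:
--         if x < power2(n-1):
--             if y < power2(n-1): # area 1
--                 return go(n-1,x,y)
--             else: # area 2
--                 return go(n-1,x,y-power2(n-1))+power2(2*n-2)
--         else:
--             if y < power2(n-1): # area 3
--                 return go(n-1,x-power2(n-1),y)+power2(2*n-2)*2
--             else: # area 4
--                 return go(n-1,x-power2(n-1),y-power2(n-1))+power2(2*n-2)*3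
-- ===== SOURCE B (Python) =====
-- def go(n, x, y):
--     # At each level the quadrant index is 2*bit_x + bit_y, so each coordinate
--     # can be encoded independently: greedy binary expansion of the coordinate
--     # over levels n-1..1, spreading each extracted bit to an even position,
--     # then combine the two codes as 2*X + Y.
--     def code(c):
--         s = 0
--         for m in reversed(range(1, n)):
--             half = 1 << m
--             if c >= half:
--                 c -= half
--                 s += 1 << (2 * m)
--         return s + c
--     return 2 * code(x) + code(y)
-- ===== Notes on version B (the rewrite author's own statement) =====
-- stated objective: faster
-- what changed: Replaces A's joint quadrant recursion on (x,y) by two independent iterative per-coordinate encodings: each coordinate is greedily expanded over levels n-1..1 with each extracted bit spread to an even bit position, and the two codes are combined as 2*X + Y; Pre_ excludes only n < 1, where A's recursion never reaches its base case (RecursionError).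
import Mathlib
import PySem

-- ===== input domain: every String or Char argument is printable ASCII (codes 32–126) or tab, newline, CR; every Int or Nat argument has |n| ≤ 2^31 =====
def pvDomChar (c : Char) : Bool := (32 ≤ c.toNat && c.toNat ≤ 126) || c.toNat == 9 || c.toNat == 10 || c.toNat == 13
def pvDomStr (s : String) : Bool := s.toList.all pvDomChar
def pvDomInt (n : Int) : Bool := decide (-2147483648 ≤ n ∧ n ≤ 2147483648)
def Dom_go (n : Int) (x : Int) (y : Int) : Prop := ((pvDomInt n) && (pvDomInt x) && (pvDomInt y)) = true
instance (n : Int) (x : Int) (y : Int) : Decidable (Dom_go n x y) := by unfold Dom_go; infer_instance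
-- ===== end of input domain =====

-- B replaces A's joint quadrant recursion on (x,y) by two independent iterative per-coordinate
-- encodings (greedy binary expansion, bits spread to even positions) combined as 2*X + Y.


-- ===== PORT A =====
-- power2(k) = 2**k; A only calls it with k ≥ 1 on inputs admitted by Pre_, where 2^k.toNat is exact.
def power2 (k : Int) : Int := 2 ^ k.toNat

-- Literal port of A's quadrant recursion. The `n ≤ 1` guard (second branch) only makes the
-- recursion total in Lean: there Python recurses forever (RecursionError), excluded by Pre_go.
def go (n : Int) (x : Int) (y : Int) : Int :=
  if n = 1 then 2 * x + y
  else if n ≤ 1 then 0  -- Python diverges here; outside Pre_go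
  else
    if x < power2 (n - 1) then
      if y < power2 (n - 1) then go (n - 1) x y
      else go (n - 1) x (y - power2 (n - 1)) + power2 (2 * n - 2)
    else
      if y < power2 (n - 1) then go (n - 1) (x - power2 (n - 1)) y + power2 (2 * n - 2) * 2
      else go (n - 1) (x - power2 (n - 1)) (y - power2 (n - 1)) + power2 (2 * n - 2) * 3
termination_by n.toNat
decreasing_by all_goals omega

-- ===== PORT B =====
-- Port of Source B. `reversed(range(1, n))` is (PySem.List.pyRange 1 n).reverse; every m in it
-- satisfies 1 ≤ m, so `1 << m` = 2 ^ m.toNat and `1 << (2*m)` = 2 ^ (2*m).toNat are exact;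
-- the loop state is the pair (c, s).
def go_alt (n : Int) (x : Int) (y : Int) : Int :=
  let code := fun (c0 : Int) =>
    let cs := ((PySem.List.pyRange 1 n 1).reverse).foldl
      (fun (st : Int × Int) (m : Int) =>
        let half := 2 ^ m.toNat
        if st.1 ≥ half then (st.1 - half, st.2 + 2 ^ (2 * m).toNat) else st)
      (c0, 0)
    cs.2 + cs.1
  2 * code x + code y

-- ===== PRECONDITION & SPEC =====
-- Pre_go excludes only n < 1, where A's recursion never reaches its base case (RecursionError).
def Pre_go (n : Int) (x : Int) (y : Int) : Prop := 1 ≤ n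
instance (n : Int) (x : Int) (y : Int) : Decidable (Pre_go n x y) := by
  unfold Pre_go; infer_instance

def pvWitness_go : Int × Int × Int := (3, 5, 6)

def Spec_go (n : Int) (x : Int) (y : Int) (out : Int) : Prop := out = go_alt n x y
instance (n : Int) (x : Int) (y : Int) (out : Int) : Decidable (Spec_go n x y out) := by
  unfold Spec_go; infer_instance

-- ===== CLAIM =====
def Claim_equal_go : Prop :=
  ∀ (n : Int) (x : Int) (y : Int), Dom_go n x y → Pre_go n x y → Spec_go n x y (go n x y)

-- ===== LEMMAS AND PROOFS =====

-- Per-coordinate code over levels m, m-1, ..., 1 (structural view of B's loop).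
def D : Nat → Int → Int
  | 0, c => c
  | m + 1, c => if c ≥ 2 ^ (m + 1) then D m (c - 2 ^ (m + 1)) + 2 ^ (2 * (m + 1)) else D m c

-- A's joint recursion splits into the two per-coordinate codes.
lemma go_eq_D : ∀ (m : Nat) (x y : Int), go ((m : Int) + 1) x y = 2 * D m x + D m y := by
  intro m
  induction m with
  | zero =>
    intro x y
    rw [show ((0 : Nat) : Int) + 1 = 1 by norm_num, go]
    simp [D]
  | succ k ih =>
    intro x y
    have hn1 : ((k : Int) + 1 + 1) ≠ 1 := by omega
    have hn2 : ¬ ((k : Int) + 1 + 1) ≤ 1 := by omega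
    have hp : power2 ((k : Int) + 1 + 1 - 1) = 2 ^ (k + 1) := by
      unfold power2; congr 1; omega
    have hq : power2 (2 * ((k : Int) + 1 + 1) - 2) = 2 ^ (2 * (k + 1)) := by
      unfold power2; congr 1; omega
    have hstep : ((k : Int) + 1 + 1 - 1) = (k : Int) + 1 := by ring
    rw [show ((k + 1 : Nat) : Int) + 1 = (k : Int) + 1 + 1 from by push_cast; ring,
      go, if_neg hn1, if_neg hn2, hp, hq, hstep]
    have hcast : ((2 : Int) ^ (k + 1)) = ((2 ^ (k + 1) : Nat) : Int) := by push_cast; ring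
    by_cases hx : x < 2 ^ (k + 1) <;> by_cases hy : y < 2 ^ (k + 1)
    · rw [if_pos hx, if_pos hy, ih x y]
      simp only [D, if_neg (by omega : ¬ x ≥ 2 ^ (k + 1)), if_neg (by omega : ¬ y ≥ 2 ^ (k + 1))]
    · rw [if_pos hx, if_neg hy, ih x (y - 2 ^ (k + 1))]
      simp only [D, if_neg (by omega : ¬ x ≥ 2 ^ (k + 1)), if_pos (by omega : y ≥ 2 ^ (k + 1))]
      ring
    · rw [if_neg hx, if_pos hy, ih (x - 2 ^ (k + 1)) y]
      simp only [D, if_pos (by omega : x ≥ 2 ^ (k + 1)), if_neg (by omega : ¬ y ≥ 2 ^ (k + 1))]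
      ring
    · rw [if_neg hx, if_neg hy, ih (x - 2 ^ (k + 1)) (y - 2 ^ (k + 1))]
      simp only [D, if_pos (by omega : x ≥ 2 ^ (k + 1)), if_pos (by omega : y ≥ 2 ^ (k + 1))]
      ring

-- B's loop body.
def stepB (st : Int × Int) (m : Int) : Int × Int :=
  let half := 2 ^ m.toNat
  if st.1 ≥ half then (st.1 - half, st.2 + 2 ^ (2 * m).toNat) else st

-- B's fold over the reversed range computes D (with the accumulator added on).
lemma fold_eq_D : ∀ (m : Nat) (c s : Int),
    (((PySem.List.pyRange 1 ((m : Int) + 1) 1).reverse).foldl stepB (c, s)).2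
      + (((PySem.List.pyRange 1 ((m : Int) + 1) 1).reverse).foldl stepB (c, s)).1
      = s + D m c := by
  intro m
  induction m with
  | zero =>
    intro c s
    have h : PySem.List.pyRange 1 (((0 : Nat) : Int) + 1) 1 = [] := by decide
    rw [h]
    simp [D]
  | succ k ih =>
    intro c s
    have hr : PySem.List.pyRange 1 (((k + 1 : Nat) : Int) + 1) 1
        = PySem.List.pyRange 1 ((k : Int) + 1) 1 ++ [((k : Int) + 1)] := by
      have := PySem.List.pyRange_one_succ_right (a := 1) (b := (k : Int) + 1) (by omega)
      rw [show (((k + 1 : Nat) : Int) + 1) = ((k : Int) + 1) + 1 from by push_cast; ring]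
      exact this
    rw [hr, List.reverse_append]
    simp only [List.reverse_singleton, List.singleton_append, List.foldl_cons]
    have ht : (((k : Int) + 1)).toNat = k + 1 := by omega
    have ht2 : ((2 * ((k : Int) + 1))).toNat = 2 * (k + 1) := by omega
    have hstep : stepB (c, s) ((k : Int) + 1)
        = if c ≥ 2 ^ (k + 1) then (c - 2 ^ (k + 1), s + 2 ^ (2 * (k + 1))) else (c, s) := by
      unfold stepB
      rw [ht, ht2]
    rw [hstep]
    by_cases hc : c ≥ ((2 : Int) ^ (k + 1))
    · rw [if_pos hc, ih (c - 2 ^ (k + 1)) (s + 2 ^ (2 * (k + 1)))]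
      simp only [D, if_pos hc]
      ring
    · rw [if_neg hc, ih c s]
      simp only [D, if_neg hc]

-- go_alt in terms of D.
lemma go_alt_eq_D (m : Nat) (x y : Int) :
    go_alt ((m : Int) + 1) x y = 2 * D m x + D m y := by
  unfold go_alt
  simp only []
  have hx := fold_eq_D m x 0
  have hy := fold_eq_D m y 0
  unfold stepB at hx hy
  simp only [zero_add] at hx hy
  rw [hx, hy]

-- ===== VERDICT =====
theorem go_spec : Claim_equal_go := by
  intro n x y _ hpre
  have hn : (1 : Int) ≤ n := hpre
  unfold Spec_go
  obtain ⟨m, hm⟩ : ∃ m : Nat, n = (m : Int) + 1 := ⟨(n - 1).toNat, by omega⟩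
  subst hm
  rw [go_eq_D m x y, go_alt_eq_D m x y]
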